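-- pv_equiv track=rewrite | github.com/MaximNikiforovEdu/pythonProject | lab_4/ex_9.py | sort_cifro
-- ===== SOURCE A (Python) =====
-- def sort_podschet(arr, n):
--     n += 1
--     arr2 = [0 if 10 ** (n - 1) > i else int(str(i)[len(str(i)) - n:len(str(i)) - n + 1]) for i in arr]
--     len_arr2 = len(arr2)
--     k = max(arr2)
--     b = [0] * len_arr2
--     c = [0] * (k + 1)
--     r = [0] * (k + 1)
--     for i in arr2:
--         c[i] += 1
--     r[0] = c[0]
--     for i in range(1, k + 1):
--         r[i] = r[i - 1] + c[i]
--     for i in range(len_arr2 - 1, -1, -1):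
--         r[arr2[i]] -= 1
--         b[r[arr2[i]]] = arr[i]
--     return b
--
-- def sort_cifro(arr):
--     tmp = 1
--     r = 1
--     max_arr = max(arr)
--     while (tmp * 10 <= max_arr):
--         r += 1
--         tmp *= 10
--     rez = []
--     for i in range(r):
--         arr = sort_podschet(list(arr), i)
--         rez.append(list(arr))
--     return rez
-- ===== SOURCE B (Python) =====
-- def _digit(x, n):
--     # the same digit key A computes: 0 for x below 10**(n-1), else the n-th decimal digit from the right
--     return 0 if 10 ** (n - 1) > x else int(str(x)[len(str(x)) - n:len(str(x)) - n + 1])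
--
-- def sort_cifro(arr):
--     tmp = 1
--     r = 1
--     max_arr = max(arr)
--     while tmp * 10 <= max_arr:
--         r += 1
--         tmp *= 10
--     rez = []
--     for i in range(r):
--         arr = sorted(arr, key=lambda x: _digit(x, i + 1))
--         rez.append(list(arr))
--     return rez
-- ===== Notes on version B (the rewrite author's own statement) =====
-- stated objective: idiomatic
-- what changed: B replaces A's hand-written counting-sort digit pass (count array, prefix sums, reverse placement) with sorted(arr, key=digit) using the identical digit-key expression, relying on the stability of Python's sort; the outer digit loop is unchanged.
-- outside the precondition, e.g. on sort_cifro([]): A raises ValueError, B raises ValueError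
import Mathlib
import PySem

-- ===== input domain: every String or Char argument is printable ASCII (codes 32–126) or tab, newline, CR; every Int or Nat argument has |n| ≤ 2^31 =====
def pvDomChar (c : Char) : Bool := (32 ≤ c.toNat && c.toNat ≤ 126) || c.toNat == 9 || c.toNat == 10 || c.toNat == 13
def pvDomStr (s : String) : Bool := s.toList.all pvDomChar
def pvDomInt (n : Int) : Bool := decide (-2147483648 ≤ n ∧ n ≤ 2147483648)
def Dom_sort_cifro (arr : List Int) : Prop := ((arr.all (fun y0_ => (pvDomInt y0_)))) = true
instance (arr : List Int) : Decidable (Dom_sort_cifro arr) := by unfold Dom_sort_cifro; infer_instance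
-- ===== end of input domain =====

-- B replaces A's hand-written counting-sort digit pass by `sorted(arr, key=digit)` with the identical
-- digit key (a stable library sort per pass instead of count/prefix/reverse-place arrays); same results.

-- ===== PORT A =====

-- Python list element assignment `xs[i] = v`; exact for in-range indices (negative = from the end).
-- Every assignment in this file happens at an in-range index (Python would raise IndexError otherwise).
def pySet {α : Type} (xs : List α) (i : Int) (v : α) : List α :=
  if 0 ≤ i then xs.set i.toNat v else xs.set (i + xs.length).toNat v

-- the `while (tmp * 10 <= max_arr): r += 1; tmp *= 10` loop of sort_cifro (tmp starts at 1, so 1 ≤ tmp)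
def widthLoop (tmp r max_arr : Int) (h : 1 ≤ tmp) : Int :=
  if tmp * 10 ≤ max_arr then widthLoop (tmp * 10) (r + 1) max_arr (by omega) else r
termination_by (max_arr - tmp).toNat
decreasing_by simp_wf; omega

-- `int(str(i)[...])` can only raise on an empty slice, which the guard `10**(n-1) > i` rules out,
-- and `max(arr2)` only raises for arr = [] (excluded by Pre_): both are ported with `.getD 0`.
def sort_podschet (arr : List Int) (n : Int) : List Int :=
  let n := n + 1
  let arr2 := arr.map (fun i =>
    if 10 ^ (n - 1).toNat > i then (0 : Int)
    else (PySem.Int.ofChars? (PySem.List.slice (PySem.Int.toChars i)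
            (some (((PySem.Int.toChars i).length : Int) - n))
            (some (((PySem.Int.toChars i).length : Int) - n + 1)))).getD 0)
  let len_arr2 : Int := arr2.length
  let k := (PySem.List.max? arr2 (fun x => x)).getD 0
  let b : List Int := List.replicate len_arr2.toNat 0
  let c : List Int := List.replicate (k + 1).toNat 0
  let r : List Int := List.replicate (k + 1).toNat 0
  let c := arr2.foldl (fun c i => pySet c i (PySem.List.pyGetD c i 0 + 1)) c
  let r := pySet r 0 (PySem.List.pyGetD c 0 0)
  let r := (PySem.List.pyRange 1 (k + 1) 1).foldl
      (fun r i => pySet r i (PySem.List.pyGetD r (i - 1) 0 + PySem.List.pyGetD c i 0)) r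
  let rb := (PySem.List.pyRange (len_arr2 - 1) (-1) (-1)).foldl
      (fun (rb : List Int × List Int) i =>
        let r := pySet rb.1 (PySem.List.pyGetD arr2 i 0)
                   (PySem.List.pyGetD rb.1 (PySem.List.pyGetD arr2 i 0) 0 - 1)
        let b := pySet rb.2 (PySem.List.pyGetD r (PySem.List.pyGetD arr2 i 0) 0)
                   (PySem.List.pyGetD arr i 0)
        (r, b)) (r, b)
  rb.2

def sort_cifro (arr : List Int) : List (List Int) :=
  let max_arr := (PySem.List.max? arr (fun x => x)).getD 0   -- max([]) raises: Pre_ excludes []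
  let r := widthLoop 1 1 max_arr (le_refl 1)
  ((PySem.List.pyRange 0 r 1).foldl
    (fun (st : List Int × List (List Int)) i =>
      let a := sort_podschet st.1 i
      (a, st.2 ++ [a])) (arr, [])).2

-- ===== PORT B =====

-- B's helper _digit(x, n): the digit key, by the same expression A uses inside its comprehension
def digitKey (x n : Int) : Int :=
  if 10 ^ (n - 1).toNat > x then (0 : Int)
  else (PySem.Int.ofChars? (PySem.List.slice (PySem.Int.toChars x)
          (some (((PySem.Int.toChars x).length : Int) - n))
          (some (((PySem.Int.toChars x).length : Int) - n + 1)))).getD 0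

def sort_cifro_alt (arr : List Int) : List (List Int) :=
  let max_arr := (PySem.List.max? arr (fun x => x)).getD 0   -- max([]) raises: Pre_ excludes []
  let r := widthLoop 1 1 max_arr (le_refl 1)
  ((PySem.List.pyRange 0 r 1).foldl
    (fun (st : List Int × List (List Int)) i =>
      let a := PySem.List.sorted st.1 (fun x => digitKey x (i + 1)) false
      (a, st.2 ++ [a])) (arr, [])).2

-- ===== PRECONDITION & SPEC =====
-- Python A raises ValueError on max([]) for the empty list; that is the only input A raises on.
def Pre_sort_cifro (arr : List Int) : Prop := arr ≠ []
instance (arr : List Int) : Decidable (Pre_sort_cifro arr) := by unfold Pre_sort_cifro; infer_instance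
def pvWitness_sort_cifro : List Int := [170, 45, 75, 90, 2, 24, 802, 66]

def Spec_sort_cifro (arr : List Int) (out : List (List Int)) : Prop := out = sort_cifro_alt arr
instance (arr : List Int) (out : List (List Int)) : Decidable (Spec_sort_cifro arr out) := by unfold Spec_sort_cifro; infer_instance

-- ===== CLAIM (what is proved, stated in full; the proofs are below) =====
def Claim_equal_sort_cifro : Prop := ∀ (arr : List Int), Dom_sort_cifro arr → Pre_sort_cifro arr → Spec_sort_cifro arr (sort_cifro arr)

-- ===== LEMMAS AND PROOFS =====

theorem natCastOpt_getD_nonneg (o : Option Nat) :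
    0 ≤ (Option.map (fun n : Int => n) (do let a ← o; pure ((a : Nat) : Int))).getD 0 := by
  cases o <;> simp

theorem ofChars?_getD_nonneg (s : List Char) (hs : '-' ∉ s) :
    0 ≤ (PySem.Int.ofChars? s).getD 0 := by
  unfold PySem.Int.ofChars?
  have hsub : ∀ c : Char, c ∈ (List.dropWhile PySem.Int.isIntSpace
      (List.dropWhile PySem.Int.isIntSpace s).reverse).reverse → c ∈ s := by
    intro c hc
    rw [List.mem_reverse] at hc
    have h1 := (List.dropWhile_sublist _ ).subset hc
    rw [List.mem_reverse] at h1
    exact (List.dropWhile_sublist _).subset h1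
  dsimp only
  split
  · rename_i ds h
    exact absurd (hsub '-' (h ▸ List.mem_cons_self)) hs
  · exact natCastOpt_getD_nonneg _
  · exact natCastOpt_getD_nonneg _

theorem digitChar_ne_minus (m : Nat) : Nat.digitChar m ≠ '-' := by
  by_cases hm : m < 16
  · interval_cases m <;> decide
  · unfold Nat.digitChar
    rw [if_neg (by omega), if_neg (by omega), if_neg (by omega), if_neg (by omega), if_neg (by omega), if_neg (by omega), if_neg (by omega), if_neg (by omega), if_neg (by omega), if_neg (by omega), if_neg (by omega), if_neg (by omega), if_neg (by omega), if_neg (by omega), if_neg (by omega), if_neg (by omega)]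
    decide

theorem toDigitsCore_no_minus (fuel n : Nat) (ds : List Char) (h : '-' ∉ ds) :
    '-' ∉ Nat.toDigitsCore 10 fuel n ds := by
  induction fuel generalizing n ds with
  | zero => simpa [Nat.toDigitsCore] using h
  | succ f ih =>
    unfold Nat.toDigitsCore
    dsimp only
    split
    · intro hc
      rcases List.mem_cons.mp hc with hc | hc
      · exact digitChar_ne_minus _ hc.symm
      · exact h hc
    · apply ih
      intro hc
      rcases List.mem_cons.mp hc with hc | hc
      · exact digitChar_ne_minus _ hc.symm
      · exact h hc

theorem toChars_no_minus (x : Int) (hx : 0 ≤ x) : '-' ∉ PySem.Int.toChars x := by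
  unfold PySem.Int.toChars
  rw [if_neg (by omega)]
  exact toDigitsCore_no_minus _ _ _ (by simp)


def bucketsD (κ : Int → Int) (K : Nat) (l : List Int) : List Int :=
  (List.range (K+1)).flatMap (fun (d : Nat) => l.filter (fun x => κ x == ((d:Nat):Int)))

theorem insertBy_append_not {α : Type} (before : α → α → Bool) (x : α) (ys zs : List α)
    (h : ∀ y ∈ ys, before x y = false) :
    PySem.List.insertBy before x (ys ++ zs) = ys ++ PySem.List.insertBy before x zs := by
  induction ys with
  | nil => simp
  | cons y t ih =>
    have hy := h y (by simp)
    simp [PySem.List.insertBy, hy]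
    exact ih (fun z hz => h z (by simp [hz]))

theorem buckets_split (κ : Int → Int) (K d : Nat) (hd : d ≤ K) (l : List Int) :
    bucketsD κ K l =
      ((List.range d).flatMap (fun (e : Nat) => l.filter (fun y => κ y == (e:Int))))
      ++ l.filter (fun y => κ y == (d:Int))
      ++ ((List.range (K - d)).flatMap (fun (e : Nat) => l.filter (fun y => κ y == ((d + 1 + e : Nat):Int)))) := by
  unfold bucketsD
  have h1 : K + 1 = d + (1 + (K - d)) := by omega
  rw [h1, List.range_add, List.flatMap_append, List.append_assoc]
  congr 1
  rw [List.flatMap_map]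
  rw [Nat.add_comm 1 (K-d), List.range_succ_eq_map, List.flatMap_cons, List.flatMap_map]
  congr 1
  apply List.flatMap_congr
  intro e he
  have : d + Nat.succ e = d + 1 + e := by omega
  rw [this]

theorem insertBy_buckets (κ : Int → Int) (K : Nat) (x : Int) (pre : List Int)
    (hx0 : 0 ≤ κ x) (hxK : κ x ≤ (K:Int)) :
    PySem.List.insertBy (fun a b => decide (κ a < κ b)) x (bucketsD κ K pre)
      = bucketsD κ K (pre ++ [x]) := by
  set dx := (κ x).toNat with hdx
  have hcast : (dx:Int) = κ x := Int.toNat_of_nonneg hx0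
  have hdxK : dx ≤ K := by omega
  rw [buckets_split κ K dx hdxK pre, buckets_split κ K dx hdxK (pre ++ [x])]
  -- the three segments of the right-hand side
  have hlow : (List.range dx).flatMap (fun (e : Nat) => (pre ++ [x]).filter (fun y => κ y == (e:Int)))
      = (List.range dx).flatMap (fun (e : Nat) => pre.filter (fun y => κ y == (e:Int))) := by
    apply List.flatMap_congr
    intro e he
    rw [List.filter_append]
    have : (([x]).filter (fun y => κ y == (e:Int))) = [] := by
      simp only [List.filter_cons, List.filter_nil]
      have : ¬ (κ x == (e:Int)) = true := by
        simp only [List.mem_range] at he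
        simp only [beq_iff_eq]
        omega
      simp [this]
    rw [this, List.append_nil]
  have hmid : (pre ++ [x]).filter (fun y => κ y == (dx:Int))
      = pre.filter (fun y => κ y == (dx:Int)) ++ [x] := by
    rw [List.filter_append]
    congr 1
    simp [hcast]
  have hhigh : (List.range (K - dx)).flatMap (fun (e : Nat) => (pre ++ [x]).filter (fun y => κ y == ((dx + 1 + e : Nat):Int)))
      = (List.range (K - dx)).flatMap (fun (e : Nat) => pre.filter (fun y => κ y == ((dx + 1 + e : Nat):Int))) := by
    apply List.flatMap_congr
    intro e he
    rw [List.filter_append]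
    have : (([x]).filter (fun y => κ y == ((dx + 1 + e : Nat):Int))) = [] := by
      simp only [List.filter_cons, List.filter_nil]
      have : ¬ κ x = (dx:Int) + 1 + (e:Int) := by omega
      simp [this]
    rw [this, List.append_nil]
  rw [hlow, hmid, hhigh]
  -- the left-hand side: skip the ≤-segments, insert before the >-segment
  rw [← List.append_assoc]
  rw [insertBy_append_not _ x _ _ (by
    intro y hy
    simp only [List.mem_append, List.mem_flatMap, List.mem_filter, List.mem_range] at hy
    rcases hy with ⟨e, he, _, hk⟩ | ⟨_, hk⟩ <;>
      · simp only [beq_iff_eq] at hk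
        simp only [decide_eq_false_iff_not, not_lt]
        omega)]
  simp only [List.append_assoc, List.singleton_append]
  congr 2
  -- insertBy x high = x :: high  (or [x] if high is empty)
  cases hh : (List.range (K - dx)).flatMap (fun (e : Nat) => pre.filter (fun y => κ y == ((dx + 1 + e : Nat):Int))) with
  | nil => simp [PySem.List.insertBy]
  | cons z t =>
    have hz : z ∈ (List.range (K - dx)).flatMap (fun (e : Nat) => pre.filter (fun y => κ y == ((dx + 1 + e : Nat):Int))) := by
      rw [hh]; simp
    have : κ x < κ z := by
      simp only [List.mem_flatMap, List.mem_filter, List.mem_range] at hz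
      rcases hz with ⟨e, he, _, hk⟩
      simp only [beq_iff_eq] at hk
      push_cast at hk
      omega
    simp [PySem.List.insertBy, this]

theorem sorted_eq_buckets (κ : Int → Int) (K : Nat) (xs : List Int)
    (h : ∀ x ∈ xs, 0 ≤ κ x ∧ κ x ≤ (K:Int)) :
    PySem.List.sorted xs κ false = bucketsD κ K xs := by
  rw [PySem.List.sorted_eq_foldl_insertBy]
  induction xs using List.reverseRecOn with
  | nil => simp [bucketsD]
  | append_singleton pre x ih =>
    rw [List.foldl_append, List.foldl_cons, List.foldl_nil]
    rw [ih (fun y hy => h y (by simp [hy]))]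
    exact insertBy_buckets κ K x pre (h x (by simp)).1 (h x (by simp)).2



theorem pySet_of_nonneg {α : Type} (xs : List α) {i : Int} (v : α) (h : 0 ≤ i) :
    pySet xs i v = xs.set i.toNat v := by
  unfold pySet; rw [if_pos h]

theorem length_pySet {α : Type} (xs : List α) (i : Int) (v : α) :
    (pySet xs i v).length = xs.length := by
  unfold pySet; split <;> simp

theorem getD_set_self {α : Type} (xs : List α) (j : Nat) (v d : α) (h : j < xs.length) :
    (xs.set j v).getD j d = v := by
  rw [List.getD_eq_getElem?_getD, List.getElem?_set, if_pos rfl, if_pos h]; rfl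

theorem getD_set_ne {α : Type} (xs : List α) (i j : Nat) (v d : α) (h : i ≠ j) :
    (xs.set i v).getD j d = xs.getD j d := by
  rw [List.getD_eq_getElem?_getD, List.getElem?_set, if_neg h, ← List.getD_eq_getElem?_getD]

-- countP (κ ≤ d+1) = countP (κ ≤ d) + countP (κ = d+1), and the < variants, over Int
theorem countP_split_le (l : List Int) (κ : Int → Int) (d : Int) :
    l.countP (fun x => κ x ≤ d) = l.countP (fun x => κ x < d) + l.countP (fun x => κ x == d) := by
  induction l with
  | nil => rfl
  | cons y t ih =>
    simp only [List.countP_cons, ih]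
    by_cases h1 : κ y < d
    · have h2 : (κ y ≤ d) = True := by simp; omega
      have h3 : (κ y == d) = false := by simp; omega
      simp [h1, h2, h3]
      omega
    · by_cases h4 : κ y = d
      · have h2 : (κ y ≤ d) = True := by simp; omega
        simp [h1, h2, h4]
        omega
      · have h2 : ¬ (κ y ≤ d) := by omega
        have h3 : (κ y == d) = false := by simp; omega
        simp [h1, h2, h3]

-- the m-th occurrence of p in l
theorem exists_index_of_lt_countP (l : List Int) (p : Int → Bool) (m : Nat) (hm : m < l.countP p) :
    ∃ j : Nat, j < l.length ∧ p (l.getD j 0) = true ∧ (l.take j).countP p = m := by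
  induction l generalizing m with
  | nil => simp at hm
  | cons y t ih =>
    by_cases hy : p y = true
    · cases m with
      | zero => exact ⟨0, by simp, by simpa using hy, by simp⟩
      | succ m' =>
        have : m' < t.countP p := by simp [List.countP_cons, hy] at hm; omega
        obtain ⟨j, hj, hpj, hcnt⟩ := ih m' this
        exact ⟨j + 1, by simpa using hj, by simpa using hpj,
          by simp [List.take_succ_cons, List.countP_cons, hy, hcnt]⟩
    · have : m < t.countP p := by simp [List.countP_cons, hy] at hm; omega
      obtain ⟨j, hj, hpj, hcnt⟩ := ih m this
      refine ⟨j + 1, by simpa using hj, by simpa using hpj, ?_⟩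
      simp [List.take_succ_cons, List.countP_cons, hy, hcnt]

-- filter indexed by the count over a prefix
theorem filter_getD_countP_take (l : List Int) (p : Int → Bool) (j : Nat)
    (hj : j < l.length) (hp : p (l.getD j 0) = true) :
    (l.filter p).getD ((l.take j).countP p) 0 = l.getD j 0 := by
  induction l generalizing j with
  | nil => simp at hj
  | cons y t ih =>
    cases j with
    | zero =>
      simp at hp
      simp [List.filter_cons, hp]
    | succ j' =>
      have hj' : j' < t.length := by simpa using hj
      have hp' : p (t.getD j' 0) = true := by simpa using hp
      by_cases hy : p y = true
      · simp [List.take_succ_cons, List.countP_cons, List.filter_cons, hy]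
        exact ih j' hj' hp'
      · simp [List.take_succ_cons, List.countP_cons, List.filter_cons, hy]
        exact ih j' hj' hp'

-- strict growth of the prefix count across an index satisfying p
theorem countP_take_lt (l : List Int) (p : Int → Bool) (j : Nat)
    (hj : j < l.length) (hp : p (l.getD j 0) = true) :
    (l.take j).countP p < l.countP p := by
  have h1 : l = l.take j ++ l.drop j := (List.take_append_drop j l).symm
  have h2 : l.drop j = l.getD j 0 :: l.drop (j+1) := by
    rw [List.getD_eq_getElem?_getD, List.getElem?_eq_getElem hj]
    simpa using (List.drop_eq_getElem_cons hj)
  conv_rhs => rw [h1, h2]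
  simp only [List.countP_append, List.countP_cons]
  have hp' : p (l[j]?.getD 0) = true := by rw [← List.getD_eq_getElem?_getD]; exact hp
  have h3 : (if p (l.getD j 0) = true then 1 else 0) = 1 := by simp [hp']
  omega

theorem countP_take_mono (l : List Int) (p : Int → Bool) (i j : Nat) (hij : i ≤ j) :
    (l.take i).countP p ≤ (l.take j).countP p := by
  have : l.take i = (l.take j).take i := by rw [List.take_take, Nat.min_eq_left hij]
  rw [this]
  exact (List.take_sublist _ _).countP_le

theorem countP_ext (l : List Int) (p q : Int → Bool) (h : ∀ a, p a = q a) :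
    l.countP p = l.countP q := by
  induction l with
  | nil => rfl
  | cons y t ih => simp [List.countP_cons, ih, h y]

theorem counts_fold (l : List Int) : ∀ (c : List Int),
    (∀ x ∈ l, 0 ≤ x ∧ x < (c.length : Int)) →
    ((l.foldl (fun c i => pySet c i (PySem.List.pyGetD c i 0 + 1)) c).length = c.length) ∧
    (∀ j : Nat, (l.foldl (fun c i => pySet c i (PySem.List.pyGetD c i 0 + 1)) c).getD j 0
        = c.getD j 0 + (l.countP (fun x => x == (j:Int)) : Int)) := by
  induction l with
  | nil => intro c _; simp
  | cons y t ih =>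
    intro c hl
    obtain ⟨hy0, hylen⟩ := hl y (by simp)
    have hstep : pySet c y (PySem.List.pyGetD c y 0 + 1) = c.set y.toNat (c.getD y.toNat 0 + 1) := by
      rw [pySet_of_nonneg _ _ hy0, PySem.List.pyGetD_of_nonneg _ _ hy0]
    rw [List.foldl_cons, hstep]
    have hlen' : (c.set y.toNat (c.getD y.toNat 0 + 1)).length = c.length := by simp
    obtain ⟨ihlen, ihget⟩ := ih (c.set y.toNat (c.getD y.toNat 0 + 1))
      (fun x hx => by rw [hlen']; exact hl x (by simp [hx]))
    refine ⟨by rw [ihlen, hlen'], ?_⟩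
    intro j
    rw [ihget j]
    by_cases hj : y.toNat = j
    · have hyj : (y == (j:Int)) = true := by simp; omega
      have hjlen : j < c.length := by omega
      rw [← hj, getD_set_self _ _ _ _ (by omega), hj, List.countP_cons, hyj]
      simp only [if_true]
      push_cast
      omega
    · have hyj : (y == (j:Int)) = false := by simp; omega
      rw [getD_set_ne _ _ _ _ _ hj, List.countP_cons, hyj]
      simp

theorem prefix_loop (K : Nat) (l : List Int) (hl : ∀ x ∈ l, 0 ≤ x) (c : List Int)
    (hc : ∀ e : Nat, c.getD e 0 = (l.countP (fun x => x == (e:Int)) : Int))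
    (r1 : List Int) (hr1len : r1.length = K+1)
    (hr10 : r1.getD 0 0 = (l.countP (fun x => x ≤ (0:Int)) : Int)) :
    ∀ (m : Nat), m ≤ K →
    (((List.range m).map (fun j : Nat => (1:Int) + (j:Int))).foldl
        (fun r i => pySet r i (PySem.List.pyGetD r (i - 1) 0 + PySem.List.pyGetD c i 0)) r1).length = K+1 ∧
    (∀ d : Nat, d ≤ m →
      (((List.range m).map (fun j : Nat => (1:Int) + (j:Int))).foldl
        (fun r i => pySet r i (PySem.List.pyGetD r (i - 1) 0 + PySem.List.pyGetD c i 0)) r1).getD d 0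
        = (l.countP (fun x => x ≤ (d:Int)) : Int)) := by
  intro m
  induction m with
  | zero =>
    intro _
    refine ⟨by simpa using hr1len, ?_⟩
    intro d hd
    have : d = 0 := by omega
    subst this
    simpa using hr10
  | succ m' ih =>
    intro hm
    obtain ⟨ihlen, ihget⟩ := ih (by omega)
    set rprev := ((List.range m').map (fun j : Nat => (1:Int) + (j:Int))).foldl
        (fun r i => pySet r i (PySem.List.pyGetD r (i - 1) 0 + PySem.List.pyGetD c i 0)) r1 with hrprev
    rw [List.range_succ, List.map_append, List.foldl_append]
    simp only [List.map_cons, List.map_nil, List.foldl_cons, List.foldl_nil]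
    have hstep : pySet rprev ((1:Int) + m') (PySem.List.pyGetD rprev ((1:Int) + m' - 1) 0 + PySem.List.pyGetD c ((1:Int) + m') 0)
        = rprev.set (m'+1) (rprev.getD m' 0 + c.getD (m'+1) 0) := by
      have hidx1 : ((1:Int) + (m':Int)).toNat = m' + 1 := by omega
      have hidx2 : ((1:Int) + (m':Int) - 1).toNat = m' := by omega
      rw [pySet_of_nonneg _ _ (by omega), PySem.List.pyGetD_of_nonneg _ _ (by omega),
          PySem.List.pyGetD_of_nonneg _ _ (by omega), hidx1, hidx2]
    rw [hstep]
    refine ⟨by simpa using ihlen, ?_⟩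
    intro d hd
    by_cases hdm : d = m' + 1
    · subst hdm
      rw [getD_set_self _ _ _ _ (by omega)]
      rw [ihget m' (le_refl _), hc (m'+1)]
      have hsplit := countP_split_le l (fun x => x) ((m':Int)+1)
      have h1 : l.countP (fun x => x < (m':Int)+1) = l.countP (fun x => x ≤ (m':Int)) := by
        exact countP_ext l _ _ (fun a => decide_eq_decide.mpr (by omega))
      have h2 : ((m'+1:Nat):Int) = (m':Int) + 1 := by push_cast; ring
      rw [h2]
      simp only [hsplit, h1]
      push_cast
      ring
    · rw [getD_set_ne _ _ _ _ _ (by omega), ihget d (by omega)]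

theorem countP_imp_le (l : List Int) (p q : Int → Bool) (h : ∀ a, p a = true → q a = true) :
    l.countP p ≤ l.countP q := by
  induction l with
  | nil => simp
  | cons y t ih =>
    simp only [List.countP_cons]
    by_cases hy : p y = true
    · simp [hy, h y hy]; omega
    · by_cases hq : q y = true <;> simp [hy, hq] <;> omega

theorem foldr_congr_mem {α γ : Type} (l : List α) (f g : α → γ → γ) (init : γ)
    (h : ∀ i ∈ l, ∀ acc, f i acc = g i acc) : l.foldr f init = l.foldr g init := by
  induction l with
  | nil => rfl
  | cons y t ih =>
    simp only [List.foldr_cons]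
    rw [ih (fun i hi acc => h i (by simp [hi]) acc), h y (by simp)]

theorem getD_append_self {α : Type} (l l' : List α) (x : α) (d : α) :
    ((l ++ x :: l').getD l.length d) = x := by
  rw [List.getD_eq_getElem?_getD, List.getElem?_append_right (le_refl _)]
  simp

theorem foldr_range_two {γ : Type} (f : Int → Int → γ → γ) :
    ∀ (xs ys : List Int), ys.length = xs.length → ∀ (init : γ),
    (List.range xs.length).foldr (fun i acc => f (xs.getD i 0) (ys.getD i 0) acc) init
      = (xs.zip ys).foldr (fun p acc => f p.1 p.2 acc) init := by
  intro xs
  induction xs using List.reverseRecOn with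
  | nil => intro ys h init; simp
  | append_singleton xs₀ x ih =>
    intro ys h init
    have hys : ys ≠ [] := by
      intro hn; rw [hn] at h; simp at h
    obtain ⟨ys₀, y, rfl⟩ : ∃ ys₀ y, ys = ys₀ ++ [y] :=
      ⟨ys.dropLast, ys.getLast hys, (List.dropLast_append_getLast hys).symm⟩
    have hlen0 : ys₀.length = xs₀.length := by simpa using h
    have hxlen : (xs₀ ++ [x]).length = xs₀.length + 1 := by simp
    rw [hxlen, List.range_succ, List.foldr_append]
    simp only [List.foldr_cons, List.foldr_nil]
    have hx : (xs₀ ++ [x]).getD xs₀.length 0 = x := getD_append_self _ _ _ _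
    have hy : (ys₀ ++ [y]).getD xs₀.length 0 = y := by
      rw [← hlen0]; exact getD_append_self _ _ _ _
    rw [hx, hy]
    have hcongr : (List.range xs₀.length).foldr
        (fun i acc => f ((xs₀ ++ [x]).getD i 0) ((ys₀ ++ [y]).getD i 0) acc) (f x y init)
        = (List.range xs₀.length).foldr
        (fun i acc => f (xs₀.getD i 0) (ys₀.getD i 0) acc) (f x y init) := by
      apply foldr_congr_mem
      intro i hi acc
      rw [List.mem_range] at hi
      rw [List.getD_append _ _ _ _ hi, List.getD_append _ _ _ _ (by omega)]
    rw [hcongr, ih ys₀ hlen0 (f x y init)]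
    rw [List.zip_append hlen0.symm]
    simp

def cntEqI (κ : Int → Int) (d : Nat) (l : List Int) : Nat := l.countP (fun x => κ x == (d:Int))
def cntLtI (κ : Int → Int) (d : Nat) (l : List Int) : Nat := l.countP (fun x => decide (κ x < (d:Int)))
def slotI (κ : Int → Int) (arr : List Int) (j : Nat) : Nat :=
  cntLtI κ (κ (arr.getD j 0)).toNat arr + cntEqI κ (κ (arr.getD j 0)).toNat (arr.take j)

theorem cnt_lt_add_eq (κ : Int → Int) (d : Nat) (l : List Int) :
    cntLtI κ d l + cntEqI κ d l = l.countP (fun x => κ x ≤ (d:Int)) := by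
  rw [countP_split_le l κ (d:Int)]; rfl

theorem cntEq_take_succ (κ : Int → Int) (d : Nat) (l : List Int) (j : Nat) (hj : j < l.length) :
    cntEqI κ d (l.take (j+1)) = cntEqI κ d (l.take j) + (if κ (l.getD j 0) == (d:Int) then 1 else 0) := by
  unfold cntEqI
  rw [List.take_add_one, List.countP_append]
  rw [List.getElem?_eq_getElem hj]
  simp only [Option.toList_some, List.countP_cons, List.countP_nil]
  rw [List.getD_eq_getElem?_getD, List.getElem?_eq_getElem hj]
  simp

theorem slot_lt (κ : Int → Int) (arr : List Int) (j : Nat) (hj : j < arr.length)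
    (h0 : 0 ≤ κ (arr.getD j 0)) :
    slotI κ arr j < arr.length := by
  unfold slotI
  set d := (κ (arr.getD j 0)).toNat with hd
  have hp : (fun x => κ x == (d:Int)) (arr.getD j 0) = true := by
    simp only [beq_iff_eq]; omega
  have h1 : cntEqI κ d (arr.take j) < cntEqI κ d arr :=
    countP_take_lt arr _ j hj hp
  have h2 : cntLtI κ d arr + cntEqI κ d arr ≤ arr.length := by
    rw [cnt_lt_add_eq]
    exact List.countP_le_length
  omega

theorem slot_ne (κ : Int → Int) (arr : List Int) (i j : Nat) (hij : i < j) (hj : j < arr.length)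
    (h0i : 0 ≤ κ (arr.getD i 0)) (h0j : 0 ≤ κ (arr.getD j 0)) :
    slotI κ arr i ≠ slotI κ arr j := by
  have sep : ∀ a b : Nat, a < b →
      cntLtI κ a arr + cntEqI κ a arr ≤ cntLtI κ b arr := by
    intro a b hab
    rw [cnt_lt_add_eq]
    apply countP_imp_le
    intro x hx
    simp only [decide_eq_true_eq] at hx ⊢
    omega
  set di := (κ (arr.getD i 0)).toNat with hdi
  set dj := (κ (arr.getD j 0)).toNat with hdj
  rcases Nat.lt_trichotomy di dj with h | h | h
  · have h1 : slotI κ arr i < cntLtI κ di arr + cntEqI κ di arr := by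
      unfold slotI
      rw [← hdi]
      have : cntEqI κ di (arr.take i) < cntEqI κ di arr := by
        apply countP_take_lt arr _ i (by omega)
        simp only [beq_iff_eq]; omega
      omega
    have h2 : cntLtI κ dj arr ≤ slotI κ arr j := by
      unfold slotI; rw [← hdj]; omega
    have := sep di dj h
    omega
  · -- same bucket: prefix counts differ strictly
    unfold slotI
    rw [← hdi, ← hdj, ← h]
    have hstep : cntEqI κ di (arr.take (i+1)) = cntEqI κ di (arr.take i) + 1 := by
      rw [cntEq_take_succ κ di arr i (by omega)]
      have : (κ (arr.getD i 0) == (di:Int)) = true := by simp only [beq_iff_eq]; omega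
      rw [this]; simp
    have hmono : cntEqI κ di (arr.take (i+1)) ≤ cntEqI κ di (arr.take j) :=
      countP_take_mono arr _ (i+1) j hij
    omega
  · have h1 : slotI κ arr j < cntLtI κ dj arr + cntEqI κ dj arr := by
      unfold slotI
      rw [← hdj]
      have : cntEqI κ dj (arr.take j) < cntEqI κ dj arr := by
        apply countP_take_lt arr _ j hj
        simp only [beq_iff_eq]; omega
      omega
    have h2 : cntLtI κ di arr ≤ slotI κ arr i := by
      unfold slotI; rw [← hdi]; omega
    have := sep dj di h
    omega

theorem place_loop (κ : Int → Int) (arr : List Int) (K : Nat)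
    (hκ : ∀ x ∈ arr, 0 ≤ κ x ∧ κ x ≤ (K:Int))
    (R1 : List Int) (hR1len : R1.length = K+1)
    (hR1 : ∀ d : Nat, d ≤ K → R1.getD d 0 = (arr.countP (fun x => κ x ≤ (d:Int)) : Int)) :
    ∀ (s p : List Int), arr = p ++ s → ∀ (B : List Int), B.length = arr.length →
    ((s.foldr (fun x rb =>
        (pySet rb.1 (κ x) (PySem.List.pyGetD rb.1 (κ x) 0 - 1),
         pySet rb.2 (PySem.List.pyGetD (pySet rb.1 (κ x) (PySem.List.pyGetD rb.1 (κ x) 0 - 1)) (κ x) 0) x))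
        (R1, B)).1.length = K+1) ∧
    ((s.foldr (fun x rb =>
        (pySet rb.1 (κ x) (PySem.List.pyGetD rb.1 (κ x) 0 - 1),
         pySet rb.2 (PySem.List.pyGetD (pySet rb.1 (κ x) (PySem.List.pyGetD rb.1 (κ x) 0 - 1)) (κ x) 0) x))
        (R1, B)).2.length = arr.length) ∧
    (∀ d : Nat, d ≤ K →
      (s.foldr (fun x rb =>
        (pySet rb.1 (κ x) (PySem.List.pyGetD rb.1 (κ x) 0 - 1),
         pySet rb.2 (PySem.List.pyGetD (pySet rb.1 (κ x) (PySem.List.pyGetD rb.1 (κ x) 0 - 1)) (κ x) 0) x))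
        (R1, B)).1.getD d 0 = ((cntLtI κ d arr + cntEqI κ d p : Nat) : Int)) ∧
    (∀ j : Nat, p.length ≤ j → j < arr.length →
      (s.foldr (fun x rb =>
        (pySet rb.1 (κ x) (PySem.List.pyGetD rb.1 (κ x) 0 - 1),
         pySet rb.2 (PySem.List.pyGetD (pySet rb.1 (κ x) (PySem.List.pyGetD rb.1 (κ x) 0 - 1)) (κ x) 0) x))
        (R1, B)).2.getD (slotI κ arr j) 0 = arr.getD j 0) ∧
    (∀ q : Nat, (∀ j : Nat, p.length ≤ j → j < arr.length → slotI κ arr j ≠ q) →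
      (s.foldr (fun x rb =>
        (pySet rb.1 (κ x) (PySem.List.pyGetD rb.1 (κ x) 0 - 1),
         pySet rb.2 (PySem.List.pyGetD (pySet rb.1 (κ x) (PySem.List.pyGetD rb.1 (κ x) 0 - 1)) (κ x) 0) x))
        (R1, B)).2.getD q 0 = B.getD q 0) := by
  intro s
  induction s with
  | nil =>
    intro p hsplit B hBlen
    have hp : p = arr := by rw [hsplit, List.append_nil]
    simp only [List.foldr_nil]
    refine ⟨hR1len, hBlen, ?_, ?_, fun q _ => trivial⟩
    · intro d hd
      rw [hR1 d hd, hp, ← cnt_lt_add_eq]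
    · intro j hj hjlen
      rw [hp] at hj
      omega
  | cons x t ih =>
    intro p hsplit B hBlen
    have hx : x ∈ arr := by rw [hsplit]; simp
    obtain ⟨hx0, hxK⟩ := hκ x hx
    have hsplit' : arr = (p ++ [x]) ++ t := by rw [hsplit]; simp
    obtain ⟨ih1, ih2, ih3, ih4, ih5⟩ := ih (p ++ [x]) hsplit' B hBlen
    simp only [List.foldr_cons]
    set rb := t.foldr (fun x rb =>
        (pySet rb.1 (κ x) (PySem.List.pyGetD rb.1 (κ x) 0 - 1),
         pySet rb.2 (PySem.List.pyGetD (pySet rb.1 (κ x) (PySem.List.pyGetD rb.1 (κ x) 0 - 1)) (κ x) 0) x))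
        (R1, B) with hrb
    set dN := (κ x).toNat with hdN
    have hdcast : (dN : Int) = κ x := Int.toNat_of_nonneg hx0
    have hdK : dN ≤ K := by omega
    -- the value read from r
    have hread : PySem.List.pyGetD rb.1 (κ x) 0 = ((cntLtI κ dN arr + cntEqI κ dN (p ++ [x]) : Nat) : Int) := by
      rw [PySem.List.pyGetD_of_nonneg _ _ hx0, ← hdN, ih3 dN hdK]
    have hcEq : cntEqI κ dN (p ++ [x]) = cntEqI κ dN p + 1 := by
      unfold cntEqI
      rw [List.countP_append]
      simp only [List.countP_cons, List.countP_nil]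
      have : (κ x == (dN:Int)) = true := by simp only [beq_iff_eq]; omega
      rw [this]; simp
    have hr' : pySet rb.1 (κ x) (PySem.List.pyGetD rb.1 (κ x) 0 - 1)
        = rb.1.set dN ((cntLtI κ dN arr + cntEqI κ dN p : Nat) : Int) := by
      rw [pySet_of_nonneg _ _ hx0, ← hdN, hread, hcEq]
      congr 1
      push_cast
      ring
    -- the slot written
    have hslotx : slotI κ arr p.length = cntLtI κ dN arr + cntEqI κ dN p := by
      unfold slotI
      rw [hsplit, getD_append_self, List.take_left]
      try rw [← hdN]
    have hwrite : PySem.List.pyGetD (pySet rb.1 (κ x) (PySem.List.pyGetD rb.1 (κ x) 0 - 1)) (κ x) 0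
        = ((slotI κ arr p.length : Nat) : Int) := by
      rw [hr', PySem.List.pyGetD_of_nonneg _ _ hx0, ← hdN]
      rw [getD_set_self _ _ _ _ (by rw [ih1]; omega)]
      try rw [hslotx]
    have hslotx_lt : slotI κ arr p.length < arr.length := by
      apply slot_lt κ arr p.length (by rw [hsplit]; simp)
      rw [hsplit, getD_append_self]
      exact hx0
    have hb' : pySet rb.2 (PySem.List.pyGetD (pySet rb.1 (κ x) (PySem.List.pyGetD rb.1 (κ x) 0 - 1)) (κ x) 0) x
        = rb.2.set (slotI κ arr p.length) x := by
      rw [hwrite, pySet_of_nonneg _ _ (by positivity)]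
      try simp
    refine ⟨?_, ?_, ?_, ?_, ?_⟩
    · rw [hr']; simp [ih1]
    · rw [hb']; simp [ih2]
    · intro d hd
      rw [hr']
      by_cases hddN : d = dN
      · subst hddN
        rw [getD_set_self _ _ _ _ (by rw [ih1]; omega)]
      · rw [getD_set_ne _ _ _ _ _ (fun hc => hddN hc.symm), ih3 d hd]
        have : cntEqI κ d (p ++ [x]) = cntEqI κ d p := by
          unfold cntEqI
          rw [List.countP_append]
          simp only [List.countP_cons, List.countP_nil]
          have : (κ x == (d:Int)) = false := by simp only [beq_eq_false_iff_ne]; omega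
          rw [this]; simp
        rw [this]
    · intro j hj hjlen
      rw [hb']
      by_cases hjp : j = p.length
      · subst hjp
        rw [getD_set_self _ _ _ _ (by rw [ih2]; omega)]
        rw [hsplit, getD_append_self]
      · have hjgt : p.length < j := by omega
        have h0j : 0 ≤ κ (arr.getD j 0) := by
          have hmem : arr.getD j 0 ∈ arr := by
            rw [List.getD_eq_getElem?_getD, List.getElem?_eq_getElem hjlen]
            exact List.getElem_mem hjlen
          exact (hκ _ hmem).1
        have h0p : 0 ≤ κ (arr.getD p.length 0) := by
          rw [hsplit, getD_append_self]; exact hx0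
        rw [getD_set_ne _ _ _ _ _ (slot_ne κ arr p.length j hjgt hjlen h0p h0j)]
        exact ih4 j (by simpa using hjgt) hjlen
    · intro q hq
      have hqx : slotI κ arr p.length ≠ q :=
        hq p.length (le_refl _) (by rw [hsplit]; simp)
      rw [hb', getD_set_ne _ _ _ _ _ hqx]
      exact ih5 q (fun j hj hjlen => hq j (by simp at hj; omega) hjlen)

theorem lowLen (κ : Int → Int) (l : List Int) (hκ0 : ∀ x ∈ l, 0 ≤ κ x) :
    ∀ d : Nat, ((List.range d).flatMap (fun (e:Nat) => l.filter (fun y => κ y == (e:Int)))).length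
      = cntLtI κ d l := by
  intro d
  induction d with
  | zero =>
    simp only [List.range_zero, List.flatMap_nil]
    unfold cntLtI
    rw [eq_comm, List.length_nil, List.countP_eq_zero]
    intro a ha
    simp only [decide_eq_true_eq]
    have := hκ0 a ha
    omega
  | succ d' ih =>
    rw [List.range_succ, List.flatMap_append]
    simp only [List.length_append, ih]
    have h1 : cntLtI κ (d'+1) l = cntLtI κ d' l + cntEqI κ d' l := by
      unfold cntLtI
      have : l.countP (fun x => decide (κ x < ((d'+1:Nat):Int))) = l.countP (fun x => κ x ≤ (d':Int)) := by
        refine countP_ext l _ _ (fun a => decide_eq_decide.mpr ?_)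
        push_cast
        omega
      rw [this, ← cnt_lt_add_eq]
      rfl
    rw [h1]
    simp [cntEqI, List.countP_eq_length_filter]

theorem buckets_len (κ : Int → Int) (K : Nat) (l : List Int)
    (hκ : ∀ x ∈ l, 0 ≤ κ x ∧ κ x ≤ (K:Int)) :
    (bucketsD κ K l).length = l.length := by
  unfold bucketsD
  rw [lowLen κ l (fun x hx => (hκ x hx).1) (K+1)]
  unfold cntLtI
  apply List.countP_eq_length.mpr
  intro a ha
  simp only [decide_eq_true_eq]
  have := (hκ a ha).2
  push_cast
  omega

theorem buckets_getD (κ : Int → Int) (K : Nat) (arr : List Int)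
    (hκ : ∀ x ∈ arr, 0 ≤ κ x ∧ κ x ≤ (K:Int)) (j : Nat) (hj : j < arr.length) :
    (bucketsD κ K arr).getD (slotI κ arr j) 0 = arr.getD j 0 := by
  have hmem : arr.getD j 0 ∈ arr := by
    rw [List.getD_eq_getElem?_getD, List.getElem?_eq_getElem hj]
    exact List.getElem_mem hj
  obtain ⟨h0, hK⟩ := hκ _ hmem
  set d := (κ (arr.getD j 0)).toNat with hd
  have hdK : d ≤ K := by omega
  have hp : (fun x => κ x == (d:Int)) (arr.getD j 0) = true := by
    simp only [beq_iff_eq]; omega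
  rw [buckets_split κ K d hdK arr, List.append_assoc]
  have hlowlen : ((List.range d).flatMap (fun (e:Nat) => arr.filter (fun y => κ y == (e:Int)))).length
      = cntLtI κ d arr := lowLen κ arr (fun x hx => (hκ x hx).1) d
  have hslot : slotI κ arr j = cntLtI κ d arr + cntEqI κ d (arr.take j) := by
    unfold slotI; rw [← hd]
  rw [hslot]
  rw [List.getD_append_right _ _ _ _ (by omega)]
  rw [hlowlen]
  have hm : cntLtI κ d arr + cntEqI κ d (arr.take j) - cntLtI κ d arr = cntEqI κ d (arr.take j) := by omega
  rw [hm]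
  have hmlt : cntEqI κ d (arr.take j) < (arr.filter (fun y => κ y == (d:Int))).length := by
    rw [← List.countP_eq_length_filter]
    exact countP_take_lt arr _ j hj hp
  rw [List.getD_append _ _ _ _ hmlt]
  exact filter_getD_countP_take arr _ j hj hp

theorem slot_surj (κ : Int → Int) (K : Nat) (arr : List Int)
    (hκ : ∀ x ∈ arr, 0 ≤ κ x ∧ κ x ≤ (K:Int)) (q : Nat) (hq : q < arr.length) :
    ∃ j : Nat, j < arr.length ∧ slotI κ arr j = q := by
  have haux : ∀ m : Nat, ∀ q' : Nat, q' < cntLtI κ m arr →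
      ∃ d : Nat, d < m ∧ cntLtI κ d arr ≤ q' ∧ q' < cntLtI κ d arr + cntEqI κ d arr := by
    intro m
    induction m with
    | zero =>
      intro q' hq'
      unfold cntLtI at hq'
      rw [List.countP_eq_zero.mpr (by
        intro a ha
        simp only [decide_eq_true_eq]
        have := (hκ a ha).1
        omega)] at hq'
      omega
    | succ m' ih =>
      intro q' hq'
      by_cases hcase : q' < cntLtI κ m' arr
      · obtain ⟨d, hd, h1, h2⟩ := ih q' hcase
        exact ⟨d, by omega, h1, h2⟩
      · refine ⟨m', by omega, by omega, ?_⟩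
        have hsucc : cntLtI κ (m'+1) arr = cntLtI κ m' arr + cntEqI κ m' arr := by
          unfold cntLtI
          have : arr.countP (fun x => decide (κ x < ((m'+1:Nat):Int))) = arr.countP (fun x => κ x ≤ (m':Int)) := by
            refine countP_ext arr _ _ (fun a => decide_eq_decide.mpr ?_)
            push_cast
            omega
          rw [this, ← cnt_lt_add_eq]
          rfl
        rw [hsucc] at hq'
        omega
  have hlen : cntLtI κ (K+1) arr = arr.length := by
    unfold cntLtI
    apply List.countP_eq_length.mpr
    intro a ha
    simp only [decide_eq_true_eq]
    have := (hκ a ha).2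
    push_cast
    omega
  obtain ⟨d, hdm, h1, h2⟩ := haux (K+1) q (by omega)
  have hm : q - cntLtI κ d arr < arr.countP (fun x => κ x == (d:Int)) := by
    unfold cntEqI at h2
    omega
  obtain ⟨j, hjlen, hpj, hcnt⟩ := exists_index_of_lt_countP arr _ _ hm
  refine ⟨j, hjlen, ?_⟩
  have hdj : (κ (arr.getD j 0)).toNat = d := by
    simp only [beq_iff_eq] at hpj
    omega
  unfold slotI
  rw [hdj]
  unfold cntEqI
  rw [hcnt]
  omega

theorem lists_eq_of_getD (A B : List Int) (hlen : A.length = B.length)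
    (h : ∀ q : Nat, q < A.length → A.getD q 0 = B.getD q 0) : A = B := by
  apply List.ext_getElem hlen
  intro i h1 h2
  have := h i h1
  rwa [List.getD_eq_getElem?_getD, List.getElem?_eq_getElem h1,
       List.getD_eq_getElem?_getD, List.getElem?_eq_getElem h2] at this

theorem digitKey_nonneg (x n : Int) : 0 ≤ digitKey x n := by
  unfold digitKey
  split
  · exact le_refl 0
  · rename_i hguard
    apply ofChars?_getD_nonneg
    intro hmem
    have hx : 0 ≤ x := by
      have hpow : (0:Int) < 10 ^ (n - 1).toNat := by positivity
      omega
    exact toChars_no_minus x hx (PySem.List.mem_of_mem_slice _ _ _ hmem)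

theorem podschet_core (κ : Int → Int) (arr : List Int) (hnil : arr ≠ []) (hκ0 : ∀ x, 0 ≤ κ x) :
    (let arr2 := arr.map κ
     let len_arr2 : Int := arr2.length
     let k := (PySem.List.max? arr2 (fun x => x)).getD 0
     let b : List Int := List.replicate len_arr2.toNat 0
     let c : List Int := List.replicate (k + 1).toNat 0
     let r : List Int := List.replicate (k + 1).toNat 0
     let c := arr2.foldl (fun c i => pySet c i (PySem.List.pyGetD c i 0 + 1)) c
     let r := pySet r 0 (PySem.List.pyGetD c 0 0)
     let r := (PySem.List.pyRange 1 (k + 1) 1).foldl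
         (fun r i => pySet r i (PySem.List.pyGetD r (i - 1) 0 + PySem.List.pyGetD c i 0)) r
     let rb := (PySem.List.pyRange (len_arr2 - 1) (-1) (-1)).foldl
         (fun (rb : List Int × List Int) i =>
           let r := pySet rb.1 (PySem.List.pyGetD arr2 i 0)
                      (PySem.List.pyGetD rb.1 (PySem.List.pyGetD arr2 i 0) 0 - 1)
           let b := pySet rb.2 (PySem.List.pyGetD r (PySem.List.pyGetD arr2 i 0) 0)
                      (PySem.List.pyGetD arr i 0)
           (r, b)) (r, b)
     rb.2) = bucketsD κ ((PySem.List.max? (arr.map κ) (fun x => x)).getD 0).toNat arr := by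
  dsimp only
  set l2 : List Int := arr.map κ with hl2
  have hl2len : l2.length = arr.length := by rw [hl2]; simp
  have hl2ne : l2 ≠ [] := by
    rw [hl2]; intro hc; exact hnil (List.map_eq_nil_iff.mp hc)
  obtain ⟨mx, hmx⟩ : ∃ mx, PySem.List.max? l2 (fun x => x) = some mx := by
    rcases hmm : PySem.List.max? l2 (fun x => x) with _ | mx
    · exact absurd ((PySem.List.max?_eq_none_iff _ _).mp hmm) hl2ne
    · exact ⟨mx, rfl⟩
  rw [hmx]
  simp only [Option.getD_some]
  have hmx0 : 0 ≤ mx := by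
    have hmem := PySem.List.max?_mem hmx
    rw [hl2] at hmem
    obtain ⟨y, _, hy⟩ := List.mem_map.mp hmem
    rw [← hy]; exact hκ0 y
  have hl2mem : ∀ x ∈ l2, 0 ≤ x := by
    intro x hx
    rw [hl2] at hx
    obtain ⟨y, _, hy⟩ := List.mem_map.mp hx
    rw [← hy]; exact hκ0 y
  have hmxmax : ∀ x ∈ l2, x ≤ mx := by
    intro x hx
    exact PySem.List.max?_isMax hmx x hx
  set K : Nat := mx.toNat with hKdef
  have hKcast : (K : Int) = mx := Int.toNat_of_nonneg hmx0
  have hκK : ∀ x ∈ arr, 0 ≤ κ x ∧ κ x ≤ (K:Int) := by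
    intro x hx
    exact ⟨hκ0 x, by rw [hKcast]; exact hmxmax _ (by rw [hl2]; exact List.mem_map_of_mem hx)⟩
  have hrep : (mx + 1).toNat = K + 1 := by omega
  rw [hrep]
  -- counts
  obtain ⟨hclen, hcget⟩ := counts_fold l2 (List.replicate (K+1) (0:Int)) (by
    intro x hx
    refine ⟨hl2mem x hx, ?_⟩
    have := hmxmax x hx
    simp only [List.length_replicate]
    omega)
  set cf := l2.foldl (fun c i => pySet c i (PySem.List.pyGetD c i 0 + 1)) (List.replicate (K+1) (0:Int)) with hcf
  have hrepD : ∀ j : Nat, (List.replicate (K+1) (0:Int)).getD j 0 = 0 := by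
    intro j
    rw [List.getD_eq_getElem?_getD, List.getElem?_replicate]
    split <;> rfl
  have hcget' : ∀ j : Nat, cf.getD j 0 = (l2.countP (fun x => x == (j:Int)) : Int) := by
    intro j
    rw [hcget j, hrepD j, zero_add]
  -- prefix sums
  have hr1len : (pySet (List.replicate (K+1) (0:Int)) 0 (PySem.List.pyGetD cf 0 0)).length = K + 1 := by
    rw [length_pySet]; simp
  have hr10 : (pySet (List.replicate (K+1) (0:Int)) 0 (PySem.List.pyGetD cf 0 0)).getD 0 0
      = (l2.countP (fun x => x ≤ (0:Int)) : Int) := by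
    rw [pySet_of_nonneg _ _ (le_refl 0)]
    rw [show ((0:Int).toNat) = 0 from rfl]
    rw [getD_set_self _ _ _ _ (by simp)]
    rw [PySem.List.pyGetD_of_nonneg _ _ (le_refl 0)]
    rw [show ((0:Int).toNat) = 0 from rfl, hcget' 0]
    rw [countP_split_le l2 (fun x => x) 0]
    have : l2.countP (fun x => decide ((fun (x:Int) => x) x < 0)) = 0 := by
      apply List.countP_eq_zero.mpr
      intro a ha
      simp only [decide_eq_true_eq]
      have := hl2mem a ha
      omega
    rw [this]
    simp
  have hrange1 : PySem.List.pyRange 1 (mx + 1) 1 = (List.range K).map (fun j : Nat => (1:Int) + (j:Int)) := by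
    rw [PySem.List.pyRange_one 1 (mx+1)]
    rw [show ((mx + 1 - 1)).toNat = K from by omega]
  rw [hrange1]
  obtain ⟨hrflen, hrfget⟩ := prefix_loop K l2 hl2mem cf hcget'
    (pySet (List.replicate (K+1) (0:Int)) 0 (PySem.List.pyGetD cf 0 0)) hr1len hr10 K (le_refl K)
  set rf := ((List.range K).map (fun j : Nat => (1:Int) + (j:Int))).foldl
      (fun r i => pySet r i (PySem.List.pyGetD r (i - 1) 0 + PySem.List.pyGetD cf i 0))
      (pySet (List.replicate (K+1) (0:Int)) 0 (PySem.List.pyGetD cf 0 0)) with hrf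
  have hrfget' : ∀ d : Nat, d ≤ K → rf.getD d 0 = (arr.countP (fun x => κ x ≤ (d:Int)) : Int) := by
    intro d hd
    rw [hrfget d hd]
    congr 1
    rw [hl2, List.countP_map]
    rfl
  -- the placement loop: índex loop → foldr over arr
  have hrangeneg : PySem.List.pyRange ((l2.length : Int) - 1) (-1) (-1)
      = (PySem.List.pyRange 0 (l2.length : Int) 1).reverse := by
    rw [PySem.List.pyRange_neg_one_eq_reverse]
    rw [show ((-1:Int) + 1) = 0 from rfl]
    rw [show ((l2.length:Int) - 1) + 1 = (l2.length:Int) from by ring]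
  rw [hrangeneg, List.foldl_reverse]
  have hrange0 : PySem.List.pyRange 0 (l2.length : Int) 1 = (List.range l2.length).map (fun j : Nat => ((j:Nat):Int)) := by
    rw [PySem.List.pyRange_one 0 (l2.length : Int)]
    have : ((l2.length : Int) - 0).toNat = l2.length := by omega
    rw [this]
    apply List.map_congr_left
    intro a _
    omega
  rw [hrange0, List.foldr_map]
  have hbody : (List.range l2.length).foldr
      (fun (x : Nat) (y : List Int × List Int) =>
        (pySet y.1 (PySem.List.pyGetD l2 ((x:Nat):Int) 0)
            (PySem.List.pyGetD y.1 (PySem.List.pyGetD l2 ((x:Nat):Int) 0) 0 - 1),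
         pySet y.2
            (PySem.List.pyGetD
              (pySet y.1 (PySem.List.pyGetD l2 ((x:Nat):Int) 0)
                (PySem.List.pyGetD y.1 (PySem.List.pyGetD l2 ((x:Nat):Int) 0) 0 - 1))
              (PySem.List.pyGetD l2 ((x:Nat):Int) 0) 0)
            (PySem.List.pyGetD arr ((x:Nat):Int) 0)))
      (rf, List.replicate (l2.length : Int).toNat (0:Int))
    = (List.range l2.length).foldr
      (fun (i : Nat) (y : List Int × List Int) =>
        (pySet y.1 (l2.getD i 0) (PySem.List.pyGetD y.1 (l2.getD i 0) 0 - 1),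
         pySet y.2
            (PySem.List.pyGetD
              (pySet y.1 (l2.getD i 0) (PySem.List.pyGetD y.1 (l2.getD i 0) 0 - 1))
              (l2.getD i 0) 0)
            (arr.getD i 0)))
      (rf, List.replicate (l2.length : Int).toNat (0:Int)) := by
    apply foldr_congr_mem
    intro i hi acc
    rw [PySem.List.pyGetD_natCast l2 i 0, PySem.List.pyGetD_natCast arr i 0]
  rw [hbody]
  have hfoldr2 := foldr_range_two
    (fun d a (rb : List Int × List Int) =>
      (pySet rb.1 d (PySem.List.pyGetD rb.1 d 0 - 1),
       pySet rb.2
          (PySem.List.pyGetD (pySet rb.1 d (PySem.List.pyGetD rb.1 d 0 - 1)) d 0) a))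
    l2 arr (by omega) (rf, List.replicate (l2.length : Int).toNat (0:Int))
  rw [hfoldr2]
  have hzip : l2.zip arr = arr.map (fun a => (κ a, a)) := by
    have hz := List.zip_map' (f := κ) (g := id) (l := arr)
    rw [List.map_id] at hz
    rw [hl2, hz]
    simp
  rw [hzip, List.foldr_map]
  -- apply the placement invariant
  have hB0len : (List.replicate (l2.length : Int).toNat (0:Int)).length = arr.length := by
    simp [hl2len]
  obtain ⟨pc1, pc2, pc3, pc4, pc5⟩ := place_loop κ arr K hκK rf hrflen hrfget' arr [] (by simp)
    (List.replicate (l2.length : Int).toNat (0:Int)) hB0len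
  apply lists_eq_of_getD
  · rw [pc2, buckets_len κ K arr hκK]
  · intro q hq
    rw [pc2] at hq
    obtain ⟨j, hjlen, hslot⟩ := slot_surj κ K arr hκK q hq
    rw [← hslot]
    rw [pc4 j (by simp) hjlen]
    rw [buckets_getD κ K arr hκK j hjlen]

theorem pass_eq (arr : List Int) (hnil : arr ≠ []) (n : Int) :
    sort_podschet arr n = PySem.List.sorted arr (fun x => digitKey x (n + 1)) false := by
  have hκ0 : ∀ x : Int, 0 ≤ (fun x => digitKey x (n + 1)) x := fun x => digitKey_nonneg x (n+1)
  have hcore := podschet_core (fun x => digitKey x (n + 1)) arr hnil hκ0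
  have hκK : ∀ x ∈ arr, 0 ≤ (fun x => digitKey x (n + 1)) x ∧ (fun x => digitKey x (n + 1)) x
      ≤ ((((PySem.List.max? (arr.map (fun x => digitKey x (n + 1))) (fun x => x)).getD 0).toNat : Nat) : Int) := by
    intro x hx
    refine ⟨hκ0 x, ?_⟩
    obtain ⟨mx, hmx⟩ : ∃ mx, PySem.List.max? (arr.map (fun x => digitKey x (n + 1))) (fun x => x) = some mx := by
      rcases hmm : PySem.List.max? (arr.map (fun x => digitKey x (n + 1))) (fun x => x) with _ | mx
      · exact absurd ((PySem.List.max?_eq_none_iff _ _).mp hmm)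
          (fun hc => hnil (List.map_eq_nil_iff.mp hc))
      · exact ⟨mx, rfl⟩
    rw [hmx]
    have h1 := PySem.List.max?_isMax hmx (digitKey x (n+1)) (List.mem_map_of_mem hx)
    have hmx0 : 0 ≤ mx := le_trans (hκ0 x) h1
    simp only [Option.getD_some]
    omega
  rw [sorted_eq_buckets (fun x => digitKey x (n + 1))
      (((PySem.List.max? (arr.map (fun x => digitKey x (n + 1))) (fun x => x)).getD 0).toNat) arr hκK]
  exact hcore

-- ===== VERDICT (by name: the statement is the Claim_ definition above) =====
theorem sort_cifro_spec : Claim_equal_sort_cifro := by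
  intro arr _ hpre
  unfold Spec_sort_cifro sort_cifro sort_cifro_alt
  suffices h : ∀ (L : List Int) (x : List Int) (acc : List (List Int)), x ≠ [] →
      (L.foldl (fun (st : List Int × List (List Int)) i =>
        (sort_podschet st.1 i, st.2 ++ [sort_podschet st.1 i])) (x, acc)) =
      (L.foldl (fun (st : List Int × List (List Int)) i =>
        (PySem.List.sorted st.1 (fun y => digitKey y (i + 1)) false,
         st.2 ++ [PySem.List.sorted st.1 (fun y => digitKey y (i + 1)) false])) (x, acc)) by
    exact congrArg Prod.snd (h _ arr [] hpre)
  intro L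
  induction L with
  | nil => intro x acc _; rfl
  | cons i t ih =>
    intro x acc hx
    simp only [List.foldl_cons]
    rw [pass_eq x hx i]
    exact ih _ _ (by
      intro hnil
      exact hx ((PySem.List.sorted_eq_nil_iff _ _ _).mp hnil))
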